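-- pv_equiv track=rewrite | github.com/chngr/unirationality-bounds | dimensions.py | penta
-- ===== SOURCE A (Python) =====
-- def is_linear(mu):
--     """
--     Check if a multiplicity sequence mu = (mu_1,...,mu_d) corresponds to
--     a linear multi-degree, i.e. mu_i = 0 for all i > 1.
--     """
--     for i, m in enumerate(mu):
--         if i > 0 and m > 0:
--             return False
--     return True
--
-- def trim(mu):
--     """
--     Remove trailing zeroes in the multiplicity sequence mu.
--     """
--     while mu != [] and mu[-1] == 0:
--         mu.pop()
--
-- def penta(mu):
--     """
--     Given a multiplicity sequence mu = (mu_1,...,mu_d), return the sequence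
--       mu' = (mu_1 + ... + mu_d,
--              ...,
--              mu_{d-2} + mu_{d-1} + mu_d,
--              mu_{d-1} + mu_d - 1,
--              mu_d - 1)
--     corresponding to the penultimate tangent transform applied to mu. Note that
--     mu' = 0 for the base case where mu corresponds to a linear multi-degree.
--     """
--     if is_linear(mu):
--         return []
--     else:
--         trim(mu)
--         mu_prime = [sum(mu[i:]) for i in range(len(mu))]
--         mu_prime[-1] -= 1
--         if len(mu) > 1:
--             mu_prime[-2] -= 1
--         return mu_prime
-- ===== SOURCE B (Python) =====
-- def penta(mu):
--     # One reverse pass with a running total instead of re-summing each suffix.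
--     # Note: A mutates its argument (trim pops trailing zeros); B does not --
--     # the equivalence is about the return value only.
--     if not any(m > 0 for m in mu[1:]):
--         return []
--     i = len(mu)
--     while mu[i - 1] == 0:
--         i -= 1
--     total = 0
--     out = []
--     for m in reversed(mu[:i]):
--         total += m
--         out.append(total)
--     out[0] -= 1
--     out[1] -= 1
--     out.reverse()
--     return out
-- ===== Notes on version B (the rewrite author's own statement) =====
-- stated objective: faster
-- what changed: Replaces the per-index re-summation of every suffix (sum(mu[i:]) for each i) with a single reverse pass keeping a running total, and replaces the enumerate/trim helpers with a direct any() guard and a last-nonzero scan; B does not mutate its argument.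
import Mathlib
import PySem

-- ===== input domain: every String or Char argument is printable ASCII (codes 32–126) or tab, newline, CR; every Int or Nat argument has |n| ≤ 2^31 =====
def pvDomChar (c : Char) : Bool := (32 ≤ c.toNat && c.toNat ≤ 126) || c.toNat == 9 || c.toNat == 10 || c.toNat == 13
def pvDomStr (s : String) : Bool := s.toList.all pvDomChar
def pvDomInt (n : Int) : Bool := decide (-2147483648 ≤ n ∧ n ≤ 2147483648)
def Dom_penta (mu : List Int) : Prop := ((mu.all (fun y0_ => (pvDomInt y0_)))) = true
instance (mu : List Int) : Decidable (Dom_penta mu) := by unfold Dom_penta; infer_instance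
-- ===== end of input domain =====

-- B replaces A's quadratic per-index suffix re-summation by one reverse pass with a
-- running total.  A mutates its argument in place (trim pops trailing zeros), B does
-- not: the equivalence proved here is about the RETURN value only.

-- ===== PORT A =====

-- 'for i, m in enumerate(mu): if i > 0 and m > 0: return False' with explicit counter
def isLinAux (i : Nat) : List Int → Bool
  | [] => true
  | m :: rest => if i > 0 && m > 0 then false else isLinAux (i + 1) rest

-- 'while mu != [] and mu[-1] == 0: mu.pop()'
def trimA (mu : List Int) : List Int :=
  if h : mu ≠ [] ∧ mu.getLast? = some 0 then trimA mu.dropLast else mu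
termination_by mu.length
decreasing_by cases mu with
  | nil => exact absurd rfl h.1
  | cons a l => simp [List.length_dropLast]

-- 'xs[j] -= 1' at Python index j (possibly negative); on IndexError (unreachable in
-- penta: the list is nonempty there) returns xs unchanged
def decAt (xs : List Int) (j : Int) : List Int :=
  match PySem.List.pyGet? xs j with
  | some v => xs.set (if j < 0 then (xs.length + j).toNat else j.toNat) (v - 1)
  | none => xs

def penta (mu : List Int) : List Int :=
  if isLinAux 0 mu then []
  else
    let t := trimA mu
    let mp := (PySem.List.pyRange 0 t.length 1).map
      (fun i => (PySem.List.slice t (some i) none).sum)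
    let mp := decAt mp (-1)
    if t.length > 1 then decAt mp (-2) else mp

-- ===== PORT B =====

-- 'i = len(mu); while mu[i-1] == 0: i -= 1'; at i = 0 Python would read mu[-1]
-- (unreachable under B's guard), here we just return 0
def trimLenB (mu : List Int) : Nat → Nat
  | 0 => 0
  | i + 1 => if mu.getD i 0 == 0 then trimLenB mu i else i + 1

def penta_alt (mu : List Int) : List Int :=
  if !((mu.drop 1).any (fun m => decide (m > 0))) then []
  else
    let i := trimLenB mu mu.length
    let p := ((mu.take i).reverse).foldl
      (fun (acc : Int × List Int) m => (acc.1 + m, acc.2 ++ [acc.1 + m]))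
      ((0 : Int), ([] : List Int))
    match p.2 with
    | a :: b :: r => ((a - 1) :: (b - 1) :: r).reverse
    | out => out.reverse  -- Python would raise IndexError on out[0]/out[1]; unreachable under the guard

-- ===== PRECONDITION & SPEC =====
def Spec_penta (mu : List Int) (out : List Int) : Prop := out = penta_alt mu
instance (mu : List Int) (out : List Int) : Decidable (Spec_penta mu out) := by unfold Spec_penta; infer_instance

-- ===== CLAIM (what is proved, stated in full; the proofs are below) =====
def Claim_equal_penta : Prop := ∀ (mu : List Int), Dom_penta mu → Spec_penta mu (penta mu)

-- ===== LEMMAS AND PROOFS =====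

/-- Reference list of suffix sums. -/
def sufs : List Int → List Int
  | [] => []
  | m :: rest => (m + rest.sum) :: sufs rest

/-- Running totals of B's forward pass. -/
def run : Int → List Int → List Int
  | _, [] => []
  | total, m :: rest => (total + m) :: run (total + m) rest

theorem isLinAux_pos (i : Nat) (xs : List Int) :
    isLinAux (i + 1) xs = !(xs.any (fun m => decide (m > 0))) := by
  induction xs generalizing i with
  | nil => simp [isLinAux]
  | cons m rest ih =>
    by_cases h : m > 0 <;> simp [isLinAux, h, ih]

theorem trimLenB_le (mu : List Int) (i : Nat) : trimLenB mu i ≤ i := by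
  induction i with
  | zero => simp [trimLenB]
  | succ i ih => unfold trimLenB; split <;> omega

theorem trimLenB_append (xs ys : List Int) (i : Nat) (h : i ≤ xs.length) :
    trimLenB (xs ++ ys) i = trimLenB xs i := by
  induction i with
  | zero => rfl
  | succ i ih =>
    unfold trimLenB
    rw [List.getD_append _ _ _ _ (by omega)]
    split <;> [exact ih (by omega); rfl]

theorem trimA_eq_take (mu : List Int) :
    trimA mu = mu.take (trimLenB mu mu.length) := by
  induction mu using List.reverseRecOn with
  | nil => unfold trimA; simp [trimLenB]
  | append_singleton xs x ih =>
    unfold trimA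
    by_cases hx : x = 0
    · subst hx
      have hcond : xs ++ [(0 : Int)] ≠ [] ∧ (xs ++ [(0 : Int)]).getLast? = some 0 := by
        simp
      rw [dif_pos hcond, List.dropLast_concat, ih]
      have hlen : (xs ++ [(0 : Int)]).length = xs.length + 1 := by simp
      rw [hlen]
      unfold trimLenB
      rw [List.getD_append_right _ _ _ _ (le_refl _)]
      simp only [Nat.sub_self, List.getD_cons_zero, BEq.rfl, if_true]
      rw [trimLenB_append xs [(0 : Int)] xs.length (le_refl _)]
      rw [List.take_append_of_le_length (trimLenB_le xs xs.length)]
      rw [← trimLenB.eq_def]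
    · have hcond : ¬ ((xs ++ [x]) ≠ [] ∧ (xs ++ [x]).getLast? = some 0) := by
        simp [hx]
      rw [dif_neg hcond]
      have hlen : (xs ++ [x]).length = xs.length + 1 := by simp
      rw [hlen]
      unfold trimLenB
      rw [List.getD_append_right _ _ _ _ (le_refl _)]
      simp [hx]

theorem trimLenB_lower (mu : List Int) (i j : Nat) (hj : j < i)
    (hz : mu.getD j 0 ≠ 0) : j + 1 ≤ trimLenB mu i := by
  induction i with
  | zero => omega
  | succ i ih =>
    unfold trimLenB
    split
    · rename_i h
      have : j ≠ i := by
        intro he; subst he; simp only [beq_iff_eq] at h; exact hz h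
      exact ih (by omega)
    · omega

theorem sufs_length (t : List Int) : (sufs t).length = t.length := by
  induction t with
  | nil => rfl
  | cons m rest ih => simp [sufs, ih]

theorem map_drop_sum (t : List Int) :
    (List.range t.length).map (fun k => (t.drop k).sum) = sufs t := by
  induction t with
  | nil => rfl
  | cons m rest ih =>
    rw [List.length_cons, List.range_succ_eq_map, List.map_cons, List.map_map]
    simp only [sufs]
    refine congrArg₂ List.cons (by simp) ?_
    rw [← ih]
    exact List.map_congr_left (fun k _ => by simp [Function.comp])

theorem mp_eq_sufs (t : List Int) :
    (PySem.List.pyRange 0 t.length 1).map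
      (fun i => (PySem.List.slice t (some i) none).sum) = sufs t := by
  rw [PySem.List.pyRange_one, List.map_map, ← map_drop_sum]
  simp only [Int.sub_zero, Int.toNat_natCast]
  apply List.map_congr_left
  intro k _
  simp [PySem.List.slice_from_natCast]

theorem foldl_run (ys : List Int) (total : Int) (out0 : List Int) :
    ys.foldl (fun (acc : Int × List Int) m => (acc.1 + m, acc.2 ++ [acc.1 + m]))
      (total, out0) = (total + ys.sum, out0 ++ run total ys) := by
  induction ys generalizing total out0 with
  | nil => simp [run]
  | cons m rest ih =>
    simp only [List.foldl_cons, List.sum_cons, ih]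
    simp [run, add_assoc]

theorem run_append (ys : List Int) (m total : Int) :
    run total (ys ++ [m]) = run total ys ++ [total + ys.sum + m] := by
  induction ys generalizing total with
  | nil => simp [run]
  | cons y rest ih =>
    simp only [List.cons_append, run, List.sum_cons, ih]
    congr 2
    ring_nf

theorem run_reverse (t : List Int) : run 0 t.reverse = (sufs t).reverse := by
  induction t with
  | nil => rfl
  | cons m rest ih =>
    rw [List.reverse_cons, run_append, ih]
    simp only [sufs, List.reverse_cons]
    congr 2
    rw [List.sum_reverse]
    omega

theorem set_penult (ys : List Int) (b a v : Int) :
    (ys ++ [b, a]).set ys.length v = ys ++ [v, a] := by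
  induction ys with
  | nil => rfl
  | cons y rest ih => simp [ih]

theorem set_last (ys : List Int) (b a v : Int) :
    (ys ++ [b, a]).set (ys.length + 1) v = ys ++ [b, v] := by
  induction ys with
  | nil => rfl
  | cons y rest ih => simp [ih]

theorem decAt_pair (ys : List Int) (b a : Int) :
    decAt (decAt (ys ++ [b, a]) (-1)) (-2) = ys ++ [b - 1, a - 1] := by
  have h1 : PySem.List.pyGet? (ys ++ [b, a]) (-1) = some a := by
    rw [PySem.List.pyGet?_neg_one]
    simp
  have step1 : decAt (ys ++ [b, a]) (-1) = ys ++ [b, a - 1] := by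
    unfold decAt
    rw [h1]
    have hidx : (((ys ++ [b, a]).length : Int) + (-1 : Int)).toNat = ys.length + 1 := by
      simp; omega
    rw [if_pos (by norm_num), hidx]
    exact set_last ys b a (a - 1)
  rw [step1]
  have h2 : PySem.List.pyGet? (ys ++ [b, a - 1]) (-2) = some b := by
    rw [PySem.List.pyGet?_neg_ofNat _ 2 (by omega) (by simp)]
    simp only [List.length_append, List.length_cons, List.length_nil]
    have : ys.length + 2 - 2 = ys.length := by omega
    rw [this, List.getElem?_append_right (le_refl _)]
    simp
  unfold decAt
  rw [h2]
  have hidx : (((ys ++ [b, a - 1]).length : Int) + (-2 : Int)).toNat = ys.length := by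
    simp
  rw [if_pos (by norm_num), hidx]
  exact set_penult ys b (a - 1) (b - 1)

theorem penta_eq_alt (mu : List Int) : penta mu = penta_alt mu := by
  cases mu with
  | nil => rfl
  | cons m rest =>
    by_cases hany : rest.any (fun m => decide (m > 0)) = true
    · -- not linear: some later entry is positive
      have hA : isLinAux 0 (m :: rest) = false := by
        simp [isLinAux, isLinAux_pos, hany]
      have hdrop : (m :: rest).drop 1 = rest := rfl
      -- the trimmed length
      set mu := m :: rest with hmu
      set k := trimLenB mu mu.length with hk
      have hkle : k ≤ mu.length := trimLenB_le mu mu.length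
      have hk2 : 2 ≤ k := by
        obtain ⟨j, hjlt, hjpos⟩ : ∃ j, ∃ h : j < rest.length, rest[j] > 0 := by
          rw [List.any_eq_true] at hany
          obtain ⟨x, hx, hxp⟩ := hany
          obtain ⟨j, hj, he⟩ := List.mem_iff_getElem.mp hx
          exact ⟨j, hj, by simp only [he]; exact of_decide_eq_true hxp⟩
        have hz : mu.getD (j + 1) 0 ≠ 0 := by
          rw [hmu]
          simp only [List.getD_cons_succ]
          rw [List.getD_eq_getElem _ _ hjlt]
          omega
        have := trimLenB_lower mu mu.length (j + 1) (by rw [hmu]; simp; omega) hz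
        omega
      have ht : trimA mu = mu.take k := trimA_eq_take mu
      have htlen : (mu.take k).length = k := by
        rw [List.length_take]; omega
      -- rewrite A
      rw [penta, if_neg (by rw [hA]; simp)]
      simp only [ht]
      rw [mp_eq_sufs (mu.take k), if_pos (by rw [htlen]; omega)]
      -- rewrite B
      rw [penta_alt, hdrop, if_neg (by rw [hany]; simp)]
      simp only [← hk, foldl_run, List.nil_append, run_reverse]
      -- decompose the reversed suffix-sum list
      have hslen : (sufs (mu.take k)).length = k := by rw [sufs_length, htlen]
      obtain ⟨a, b, r, hrev⟩ : ∃ a b r, (sufs (mu.take k)).reverse = a :: b :: r := by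
        cases hsr : (sufs (mu.take k)).reverse with
        | nil => exfalso; have := congrArg List.length hsr; simp [hslen] at this; omega
        | cons a tl =>
          cases tl with
          | nil => exfalso; have := congrArg List.length hsr; simp [hslen] at this; omega
          | cons b r => exact ⟨a, b, r, rfl⟩
      have hsufs : sufs (mu.take k) = r.reverse ++ [b, a] := by
        have := congrArg List.reverse hrev
        simpa using this
      rw [hrev, hsufs, decAt_pair]
      simp
    · -- linear: both sides return []
      have hA : isLinAux 0 (m :: rest) = true := by
        simp [isLinAux, isLinAux_pos, hany]
      rw [penta, if_pos hA, penta_alt]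
      have : (m :: rest).drop 1 = rest := rfl
      rw [this, if_pos (by rw [eq_false_of_ne_true hany]; simp)]

-- ===== VERDICT (by name: the statement is the Claim_ definition above) =====
theorem penta_spec : Claim_equal_penta := by
  intro mu _
  exact penta_eq_alt mu
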